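-- pv_equiv track=rewrite | github.com/hjolie/wehelp5 | week2/task1-4.py | find_unique_middle_name
-- ===== SOURCE A (Python) =====
-- from collections import Counter
--
-- def find_unique_middle_name(my_list):
--     # Concatenate all the middle names into one (string)
--     middle_names = "".join(my_list)
--
--     # Count the occurrences of each middle name
--     middle_name_counts = Counter(middle_names)
--
--     # Filter out the middle name that appear only once
--     unique_middle_name = ""
--     for name, count in middle_name_counts.items():
--         if count == 1:
--             unique_middle_name = name
--
--     return unique_middle_name
-- ===== SOURCE B (Python) =====
-- from collections import Counter
--
-- def find_unique_middle_name(my_list):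
--     middle_names = "".join(my_list)
--     counts = Counter(middle_names)
--     for ch in reversed(middle_names):
--         if counts[ch] == 1:
--             return ch
--     return ""
-- ===== Notes on version B (the rewrite author's own statement) =====
-- stated objective: alternative
-- what changed: B keeps the one-pass frequency count but replaces A's forward scan over the Counter's distinct keys (overwriting an accumulator to keep the last hit) with an early-exit reverse traversal of the concatenated characters returning the first character whose count is 1.
import Mathlib
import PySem

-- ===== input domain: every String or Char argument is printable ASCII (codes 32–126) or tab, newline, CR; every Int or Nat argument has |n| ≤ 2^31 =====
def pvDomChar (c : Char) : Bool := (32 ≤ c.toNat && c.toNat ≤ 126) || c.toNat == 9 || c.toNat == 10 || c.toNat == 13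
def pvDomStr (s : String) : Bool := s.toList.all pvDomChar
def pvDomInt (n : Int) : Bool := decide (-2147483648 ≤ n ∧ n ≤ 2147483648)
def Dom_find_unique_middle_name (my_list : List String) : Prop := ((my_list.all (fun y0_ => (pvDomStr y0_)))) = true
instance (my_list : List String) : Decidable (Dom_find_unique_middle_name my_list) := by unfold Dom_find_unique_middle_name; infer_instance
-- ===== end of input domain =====

-- B replaces A's forward scan over the Counter's distinct keys with an early-exit
-- reverse traversal of the concatenated characters (same frequency table, different pass).


-- ===== PORT A =====
def find_unique_middle_name (my_list : List String) : String :=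
  -- middle_names = "".join(my_list)
  let middle_names : String := PySem.Str.join "" my_list
  -- middle_name_counts = Counter(middle_names)
  let middle_name_counts : PySem.Dict Char Int := PySem.Dict.counter middle_names.toList
  -- for name, count in middle_name_counts.items(): if count == 1: unique_middle_name = name
  let unique_middle_name : String :=
    middle_name_counts.items.foldl
      (fun acc nc => if nc.2 == 1 then String.ofList [nc.1] else acc) ""
  unique_middle_name

-- ===== PORT B =====
def find_unique_middle_name_alt (my_list : List String) : String :=
  let middle_names : String := PySem.Str.join "" my_list
  let counts : PySem.Dict Char Int := PySem.Dict.counter middle_names.toList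
  -- for ch in reversed(middle_names): if counts[ch] == 1: return ch       (early exit)
  match middle_names.toList.reverse.find? (fun ch => counts.getD ch 0 == 1) with
  | some ch => String.ofList [ch]
  | none => ""

-- ===== PRECONDITION & SPEC =====
def Spec_find_unique_middle_name (my_list : List String) (out : String) : Prop := out = find_unique_middle_name_alt my_list
instance (my_list : List String) (out : String) : Decidable (Spec_find_unique_middle_name my_list out) := by unfold Spec_find_unique_middle_name; infer_instance

-- ===== CLAIM (what is proved, stated in full; the proofs are below) =====
def Claim_equal_find_unique_middle_name : Prop := ∀ (my_list : List String), Dom_find_unique_middle_name my_list → Spec_find_unique_middle_name my_list (find_unique_middle_name my_list)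

-- ===== LEMMAS AND PROOFS =====

-- A fold that ignores its accumulator returns f of the last element (or the initial value).
theorem foldl_const_eq_getLast {α β : Type} (l : List α) (init : β) (f : α → β) :
    l.foldl (fun _ x => f x) init = (l.getLast?).elim init f := by
  induction l generalizing init with
  | nil => rfl
  | cons a t ih =>
      cases t with
      | nil => rfl
      | cons b u => simpa using ih (f a)

-- Filtering set(cs) by a predicate that only holds on elements occurring at most once in cs
-- gives the same list as filtering cs itself (generalized over the fold's accumulator).
theorem foldl_add_filter (p : Char → Bool) :
    ∀ (cs seen : List Char),
      (∀ c, p c = true → c ∈ seen → c ∉ cs) →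
      (∀ c, p c = true → cs.count c ≤ 1) →
      (cs.foldl PySem.Set.add seen).filter p = seen.filter p ++ cs.filter p := by
  intro cs
  induction cs with
  | nil => intro seen _ _; simp
  | cons a t ih =>
      intro seen h1 h2
      simp only [List.foldl_cons]
      by_cases hmem : a ∈ seen
      · have hpa : p a = false := by
          cases hpa : p a with
          | false => rfl
          | true => exact absurd (by simp) (h1 a hpa hmem)
        have hadd : PySem.Set.add seen a = seen := by
          simp [PySem.Set.add, PySem.Set.contains, hmem]
        rw [hadd, ih seen (fun c hc hcs => fun hmt => (h1 c hc hcs) (by simp [hmt]))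
            (fun c hc => le_trans (List.count_le_count_cons ..) (h2 c hc))]
        simp [hpa]
      · have hadd : PySem.Set.add seen a = seen ++ [a] := by
          simp [PySem.Set.add, PySem.Set.contains, hmem]
        rw [hadd]
        by_cases hpa : p a = true
        · have hat : a ∉ t := by
            have := h2 a hpa
            simp at this
            simpa [List.count_eq_zero] using this
          have h1' : ∀ c, p c = true → c ∈ seen ++ [a] → c ∉ t := by
            intro c hc hcm
            rcases List.mem_append.mp hcm with h | h
            · exact fun hmt => (h1 c hc h) (by simp [hmt])
            · simp at h; subst h; exact hat
          rw [ih (seen ++ [a]) h1' (fun c hc => le_trans (List.count_le_count_cons ..) (h2 c hc))]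
          simp [List.filter_append, hpa]
        · have hpa' : p a = false := by simpa using hpa
          have h1' : ∀ c, p c = true → c ∈ seen ++ [a] → c ∉ t := by
            intro c hc hcm
            rcases List.mem_append.mp hcm with h | h
            · exact fun hmt => (h1 c hc h) (by simp [hmt])
            · simp at h; subst h; simp [hc] at hpa'
          rw [ih (seen ++ [a]) h1' (fun c hc => le_trans (List.count_le_count_cons ..) (h2 c hc))]
          simp [List.filter_append, hpa']

-- The two passes agree on the concatenated character list.
theorem core_eq (cs : List Char) :
    ((PySem.Dict.counter cs).items.foldl
        (fun acc nc => if nc.2 == 1 then String.ofList [nc.1] else acc) "")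
    = match cs.reverse.find? (fun ch => (PySem.Dict.counter cs).getD ch 0 == 1) with
      | some ch => String.ofList [ch]
      | none => "" := by
  have hp : (fun ch => (PySem.Dict.counter cs).getD ch 0 == 1)
      = (fun ch => ((cs.count ch : Int) == 1)) := by
    funext ch; rw [PySem.Dict.getD_counter]
  rw [PySem.Dict.items_counter, List.foldl_map, hp]
  set p : Char → Bool := fun ch => ((cs.count ch : Int) == 1) with hpdef
  have hstep : ((PySem.Set.ofList cs).foldl
      (fun acc k => if ((cs.count k : Int) == 1) = true then String.ofList [k] else acc) "")
      = ((PySem.Set.ofList cs).filter p).foldl (fun _ k => String.ofList [k]) "" := by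
    rw [PySem.List.foldl_if_eq_foldl_filter]
  simp only [beq_iff_eq] at hstep ⊢
  rw [hstep]
  have hcount : ∀ c, p c = true → cs.count c ≤ 1 := by
    intro c hc
    simp only [hpdef, beq_iff_eq] at hc
    omega
  have hfilter : (PySem.Set.ofList cs).filter p = cs.filter p := by
    rw [PySem.Set.ofList_eq_foldl]
    simpa using foldl_add_filter p cs [] (by simp) hcount
  rw [hfilter, foldl_const_eq_getLast, ← List.head?_reverse, ← List.filter_reverse,
    List.head?_filter]
  cases cs.reverse.find? p <;> rfl

-- ===== VERDICT (by name: the statement is the Claim_ definition above) =====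
theorem find_unique_middle_name_spec : Claim_equal_find_unique_middle_name := by
  intro my_list _
  unfold Spec_find_unique_middle_name find_unique_middle_name find_unique_middle_name_alt
  exact core_eq (PySem.Str.join "" my_list).toList
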